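-- pv_equiv track=rewrite | github.com/GhoshBishwayan/codewars-problem-solving | problem8.py | high
-- ===== SOURCE A (Python) =====
-- def high(x):
--
--     arrx = x.split()
--     sum = 0
--     h_s = {}
--     for i in arrx:
--         for j in i:
--             sum += (ord(j) -96)
--         h_s.update({i: sum})
--         sum = 0
--
--
--     return max(h_s, key=h_s.get)
-- ===== SOURCE B (Python) =====
-- def high(x):
--     words = x.split()
--     return sorted(words, key=lambda w: -sum(ord(c) - 96 for c in w))[0]
-- ===== Notes on version B (the rewrite author's own statement) =====
-- stated objective: simpler
-- what changed: Replaces A's build-a-dict-then-max(dict, key=get) selection with a one-line stable sort by negated letter-sum and taking the first element; stability makes the first word win ties exactly as A's max over insertion-ordered keys does, and [0] on the empty split raises just like A's max of an empty dict.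
import Mathlib
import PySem

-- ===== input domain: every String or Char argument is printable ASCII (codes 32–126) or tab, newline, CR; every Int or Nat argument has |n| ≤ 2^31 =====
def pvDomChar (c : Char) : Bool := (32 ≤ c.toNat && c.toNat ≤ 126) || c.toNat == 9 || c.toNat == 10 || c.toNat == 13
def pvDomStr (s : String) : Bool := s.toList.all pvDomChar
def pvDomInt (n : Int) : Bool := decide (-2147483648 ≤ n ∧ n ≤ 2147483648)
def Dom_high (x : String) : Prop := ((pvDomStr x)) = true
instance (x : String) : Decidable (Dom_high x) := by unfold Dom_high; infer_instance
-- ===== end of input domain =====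

-- B replaces A's dict-then-max selection by a stable sort on the negated letter-sum
-- and taking the first element (objective: simpler; not faster).

-- ===== PORT A =====
-- dict word → letter-sum, then max over the keys with key = dict lookup
-- (h_s.get returns the stored int on every key present; ".getD 0" default never fires on keys).
-- max(...) over an empty dict raises ValueError: excluded by Pre_high; '.getD ""' is that excluded case.
def high (x : String) : String :=
  let arrx := PySem.Str.split₀ x
  let h_s : PySem.Dict String Int :=
    arrx.foldl (fun d i => d.insert i (i.toList.foldl (fun sum j => sum + ((j.toNat : Int) - 96)) 0)) PySem.Dict.empty
  (PySem.List.max? h_s.keys (fun k => h_s.getD k 0)).getD ""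

-- ===== PORT B =====
-- sorted(words, key=lambda w: -letterSum(w))[0]; indexing [] raises IndexError in Python,
-- that case (pyGet? = none) is excluded by Pre_high; '.getD ""' is that excluded case.
def high_alt (x : String) : String :=
  let words := PySem.Str.split₀ x
  (PySem.List.pyGet?
    (PySem.List.sorted words (fun w => -((w.toList.map (fun c => (c.toNat : Int) - 96)).sum)))
    0).getD ""

-- ===== PRECONDITION & SPEC =====
-- Pre_ excludes exactly the whitespace-only inputs (no words), on which Python's A
-- raises ValueError (max() of an empty dict).
def Pre_high (x : String) : Prop := PySem.Str.split₀ x ≠ []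
instance (x : String) : Decidable (Pre_high x) := by unfold Pre_high; infer_instance

def pvWitness_high : String := "hello world"

def Spec_high (x : String) (out : String) : Prop := out = high_alt x
instance (x : String) (out : String) : Decidable (Spec_high x out) := by unfold Spec_high; infer_instance

-- ===== CLAIM (what is proved, stated in full; the proofs are below) =====
def Claim_equal_high : Prop := ∀ (x : String), Dom_high x → Pre_high x → Spec_high x (high x)

-- ===== LEMMAS AND PROOFS =====

-- max? of a one-step-longer list (the foldl unrolled at the right end)
theorem hm_max_append {α κ : Type} [LT κ] [DecidableLT κ] (l : List α) (y : α) (key : α → κ) :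
    PySem.List.max? (l ++ [y]) key =
      match PySem.List.max? l key with
      | none => some y
      | some m => if key m < key y then some y else some m := by
  simp only [PySem.List.max?, List.foldl_append]
  rfl

theorem hm_max_congr {α κ : Type} [LT κ] [DecidableLT κ] (l : List α) (k1 k2 : α → κ)
    (h : ∀ x ∈ l, k1 x = k2 x) : PySem.List.max? l k1 = PySem.List.max? l k2 := by
  induction l using List.reverseRecOn with
  | nil => rfl
  | append_singleton l y IH =>
    rw [hm_max_append, hm_max_append, IH (fun x hx => h x (List.mem_append_left _ hx))]
    cases h0 : PySem.List.max? l k2 with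
    | none => simp
    | some m =>
      have hm : m ∈ l := PySem.List.max?_mem h0
      simp [h y (by simp), h m (List.mem_append_left _ hm)]

theorem hm_max_ofList {α κ : Type} [BEq α] [LawfulBEq α] [LinearOrder κ]
    (l : List α) (key : α → κ) :
    PySem.List.max? (PySem.Set.ofList l) key = PySem.List.max? l key := by
  induction l using List.reverseRecOn with
  | nil => rfl
  | append_singleton l y IH =>
    rw [PySem.Set.ofList_append_singleton]
    by_cases hy : y ∈ l
    · have hadd : (PySem.Set.ofList l).add y = PySem.Set.ofList l := by
        simp [PySem.Set.add, (PySem.Set.mem_ofList l y).2 hy]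
      rw [hadd, IH, hm_max_append]
      cases h0 : PySem.List.max? l key with
      | none => exact absurd ((PySem.List.max?_eq_none_iff l key).1 h0 ▸ hy) (List.not_mem_nil)
      | some m =>
        have hle : key y ≤ key m := PySem.List.max?_isMax h0 y hy
        simp [not_lt.2 hle]
    · have hadd : (PySem.Set.ofList l).add y = PySem.Set.ofList l ++ [y] := by
        simp only [PySem.Set.add, ite_eq_right_iff]
        intro hc
        exact absurd ((PySem.Set.mem_ofList l y).1 (by simpa using hc)) hy
      rw [hadd, hm_max_append, hm_max_append, IH]

-- lookup in the dict built by A's loop: the stored value is the per-word score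
theorem hm_dict_getD (f : String → Int) (ws : List String) (d : PySem.Dict String Int) (k : String) :
    (ws.foldl (fun d i => d.insert i (f i)) d).getD k 0 =
      if k ∈ ws then f k else d.getD k 0 := by
  induction ws generalizing d with
  | nil => simp
  | cons i t IH =>
    simp only [List.foldl_cons]
    rw [IH]
    rw [PySem.Dict.getD_insert]
    by_cases h1 : k ∈ t <;> by_cases h2 : k = i <;> simp [h1, h2]

-- STABILITY: the head of the stable sort by key -f is exactly max(l, key=f)'s answer
-- (the first element of maximal f), proved on the foldl/insertBy form of sorted.
theorem hm_sorted_head {α : Type} (f : α → Int) (l : List α) (m : α)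
    (h : PySem.List.max? l f = some m) :
    ∃ t, PySem.List.sorted l (fun w => -(f w)) = m :: t := by
  rw [PySem.List.sorted_eq_foldl_insertBy]
  induction l using List.reverseRecOn generalizing m with
  | nil => simp [PySem.List.max?] at h
  | append_singleton l y IH =>
    rw [hm_max_append] at h
    rw [List.foldl_append, List.foldl_cons, List.foldl_nil]
    cases h0 : PySem.List.max? l f with
    | none =>
      have hl : l = [] := (PySem.List.max?_eq_none_iff l f).1 h0
      rw [h0] at h
      simp only [Option.some.injEq] at h
      subst hl
      exact ⟨[], by simp [PySem.List.insertBy, ← h]⟩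
    | some m0 =>
      rw [h0] at h
      simp only at h
      obtain ⟨t, ht⟩ := IH m0 h0
      rw [ht]
      by_cases hlt : f m0 < f y
      · rw [if_pos hlt] at h
        simp only [Option.some.injEq] at h
        subst h
        refine ⟨m0 :: t, ?_⟩
        simp [PySem.List.insertBy, neg_lt_neg_iff, hlt]
      · rw [if_neg hlt] at h
        simp only [Option.some.injEq] at h
        subst h
        refine ⟨PySem.List.insertBy (fun a b => decide (-(f a) < -(f b))) y t, ?_⟩
        simp [PySem.List.insertBy, neg_lt_neg_iff, hlt]

-- ===== VERDICT (by name: the statement is the Claim_ definition above) =====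
theorem high_spec : Claim_equal_high := by
  intro x _ hpre
  unfold Spec_high high high_alt
  simp only
  set ws := PySem.Str.split₀ x with hws
  set f : String → Int := fun w => ((w.toList.map (fun c => (c.toNat : Int) - 96)).sum) with hf
  set d : PySem.Dict String Int :=
    ws.foldl (fun d i => d.insert i (i.toList.foldl (fun sum j => sum + ((j.toNat : Int) - 96)) 0))
      PySem.Dict.empty with hd
  -- the dict's keys are the distinct words, in first-occurrence order
  have hkeys : d.keys = PySem.Set.ofList ws := by
    rw [hd, PySem.Dict.keys_foldl_insert]
    rfl
  -- lookup = f on every word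
  have hget : ∀ k ∈ ws, d.getD k 0 = f k := by
    intro k hk
    rw [hd, hm_dict_getD (fun i => i.toList.foldl (fun sum j => sum + ((j.toNat : Int) - 96)) 0) ws,
      if_pos hk, PySem.List.foldl_add]
    simp [hf]
  -- A's value = max(words, key=f) over the deduped word list = over the word list
  have hA : PySem.List.max? d.keys (fun k => d.getD k 0) = PySem.List.max? ws f := by
    rw [hkeys]
    rw [hm_max_congr (PySem.Set.ofList ws) _ f
      (fun k hk => hget k ((PySem.Set.mem_ofList ws k).1 hk))]
    exact hm_max_ofList ws f
  rw [hA]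
  cases hm : PySem.List.max? ws f with
  | none => exact absurd ((PySem.List.max?_eq_none_iff ws f).1 hm) hpre
  | some m =>
    obtain ⟨t, ht⟩ := hm_sorted_head f ws m hm
    rw [ht]
    simp [PySem.List.pyGet?, PySem.List.pyIdx?]
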